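-- pv_equiv track=rewrite | github.com/AJamal27891/dw-bench | evaluation/baselines/graph_aug.py | bfs_subgraph
-- ===== SOURCE A (Python) =====
-- from collections import deque
--
-- def bfs_subgraph(start_tables: list, adj: dict, max_hops: int = 3):
--     """BFS from start tables, return tables within max_hops."""
--     visited = set(start_tables)
--     queue = deque([(t, 0) for t in start_tables])
--     layers = {0: set(start_tables)}
--
--     while queue:
--         node, depth = queue.popleft()
--         if depth >= max_hops:
--             continue
--         for neighbor in adj.get(node, []):
--             if neighbor not in visited:
--                 visited.add(neighbor)
--                 queue.append((neighbor, depth + 1))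
--                 if depth + 1 not in layers:
--                     layers[depth + 1] = set()
--                 layers[depth + 1].add(neighbor)
--
--     return visited, layers
-- ===== SOURCE B (Python) =====
-- def bfs_subgraph(start_tables: list, adj: dict, max_hops: int = 3):
--     """Level-synchronous BFS: expand one whole frontier per hop."""
--     visited = set(start_tables)
--     frontier = list(start_tables)
--     layers = {0: set(start_tables)}
--     hop = 1
--     while frontier and hop <= max_hops:
--         next_frontier = []
--         for node in frontier:
--             for neighbor in adj.get(node, []):
--                 if neighbor not in visited:
--                     visited.add(neighbor)
--                     next_frontier.append(neighbor)
--         if next_frontier: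
--             layers[hop] = set(next_frontier)
--         frontier = next_frontier
--         hop += 1
--     return visited, layers
-- ===== Notes on version B (the rewrite author's own statement) =====
-- stated objective: simpler
-- what changed: Replaces A's deque-based per-node BFS carrying (node, depth) pairs by a level-synchronous BFS that expands one whole frontier list per hop, writing each layer entry once per hop instead of element by element.
import Mathlib
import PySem

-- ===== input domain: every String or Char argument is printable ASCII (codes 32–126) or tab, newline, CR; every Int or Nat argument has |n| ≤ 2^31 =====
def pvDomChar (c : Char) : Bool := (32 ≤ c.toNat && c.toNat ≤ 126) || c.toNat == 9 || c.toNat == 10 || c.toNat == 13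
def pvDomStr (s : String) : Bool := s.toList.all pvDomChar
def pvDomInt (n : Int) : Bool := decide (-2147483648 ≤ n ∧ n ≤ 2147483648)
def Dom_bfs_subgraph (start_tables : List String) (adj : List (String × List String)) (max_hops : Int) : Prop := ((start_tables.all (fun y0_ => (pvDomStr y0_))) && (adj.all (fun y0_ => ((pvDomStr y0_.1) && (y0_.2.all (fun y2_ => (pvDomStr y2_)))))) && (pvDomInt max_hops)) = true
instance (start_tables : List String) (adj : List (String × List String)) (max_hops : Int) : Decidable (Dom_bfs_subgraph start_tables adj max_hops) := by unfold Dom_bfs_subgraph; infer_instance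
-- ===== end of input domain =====

-- B replaces A's per-node deque (node, depth) BFS by a level-synchronous BFS that expands one
-- whole frontier per hop; same return value, objective: simpler (no deque, no per-node depths).

-- ===== PORT A =====
-- BFS state: (visited, queue, layers)
def aStep (d : Int)
    (st : PySem.Set String × List (String × Int) × PySem.Dict Int (PySem.Set String))
    (nb : String) :
    PySem.Set String × List (String × Int) × PySem.Dict Int (PySem.Set String) :=
  if PySem.Set.contains st.1 nb then st
  else
    let visited := PySem.Set.add st.1 nb
    let queue := st.2.1 ++ [(nb, d + 1)]
    let layers := if st.2.2.contains (d + 1) then st.2.2 else st.2.2.insert (d + 1) PySem.Set.empty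
    let layers := layers.modify (d + 1) PySem.Set.empty (fun s => PySem.Set.add s nb)
    (visited, queue, layers)

-- measure helper for the while-loop's termination: unvisited occurrences in adj's value lists
def aMeas (adj : PySem.Dict String (List String)) (v : PySem.Set String) : Nat :=
  (adj.values.flatten.filter (fun s => !(PySem.Set.contains v s))).length

theorem pv_filter_add (F : List String) (v : PySem.Set String) (nb : String) :
    F.filter (fun s => !(PySem.Set.contains (v ++ [nb]) s))
      = (F.filter (fun s => !(PySem.Set.contains v s))).filter (fun s => !(s == nb)) := by
  rw [List.filter_filter]
  apply List.filter_congr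
  intro s _
  simp only [PySem.Set.contains_eq_listContains, List.contains_append]
  by_cases h2 : s = nb
  · subst h2; simp
  · simp [h2]

theorem aMeas_add_le (adj : PySem.Dict String (List String)) (v : PySem.Set String)
    (nb : String) : aMeas adj (PySem.Set.add v nb) ≤ aMeas adj v := by
  by_cases h : nb ∈ v
  · rw [PySem.Set.add_of_mem h]
  · rw [PySem.Set.add_of_not_mem h]
    unfold aMeas
    rw [pv_filter_add]
    exact List.length_filter_le _ _

theorem aMeas_add_lt (adj : PySem.Dict String (List String)) (v : PySem.Set String)
    (nb : String) (hF : nb ∈ adj.values.flatten) (h : nb ∉ v) :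
    aMeas adj (PySem.Set.add v nb) < aMeas adj v := by
  rw [PySem.Set.add_of_not_mem h]
  unfold aMeas
  rw [pv_filter_add]
  rw [List.length_filter_lt_length_iff_exists]
  refine ⟨nb, ?_, by simp⟩
  rw [List.mem_filter]
  refine ⟨hF, ?_⟩
  simp [PySem.Set.contains_eq_listContains, h]

theorem aStep_fst (d : Int) (st : PySem.Set String × List (String × Int) × PySem.Dict Int (PySem.Set String))
    (nb : String) : (aStep d st nb).1 = st.1 ∨ ((aStep d st nb).1 = PySem.Set.add st.1 nb ∧ nb ∉ st.1) := by
  by_cases h : nb ∈ st.1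
  · left; simp [aStep, h]
  · right
    exact ⟨by simp [aStep, h], h⟩

theorem aMeas_fold_le (adj : PySem.Dict String (List String)) (d : Int) (ns : List String)
    (st : PySem.Set String × List (String × Int) × PySem.Dict Int (PySem.Set String)) :
    aMeas adj (ns.foldl (aStep d) st).1 ≤ aMeas adj st.1 := by
  induction ns generalizing st with
  | nil => simp
  | cons nb rest ih =>
    rw [List.foldl_cons]
    refine le_trans (ih _) ?_
    rcases aStep_fst d st nb with h | ⟨h, _⟩
    · rw [h]
    · rw [h]; exact aMeas_add_le adj st.1 nb

theorem aStep_fold_lex (adj : PySem.Dict String (List String)) (d : Int) (ns : List String)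
    (hns : ∀ nb ∈ ns, nb ∈ adj.values.flatten)
    (st : PySem.Set String × List (String × Int) × PySem.Dict Int (PySem.Set String)) :
    aMeas adj (ns.foldl (aStep d) st).1 < aMeas adj st.1 ∨
      ns.foldl (aStep d) st = st := by
  induction ns generalizing st with
  | nil => right; rfl
  | cons nb rest ih =>
    rw [List.foldl_cons]
    by_cases h : nb ∈ st.1
    · have : aStep d st nb = st := by simp [aStep, h]
      rw [this]
      exact ih (fun x hx => hns x (List.mem_cons_of_mem _ hx)) st
    · left
      have h1 : (aStep d st nb).1 = PySem.Set.add st.1 nb := by simp [aStep, h]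
      calc aMeas adj (rest.foldl (aStep d) (aStep d st nb)).1
          ≤ aMeas adj (aStep d st nb).1 := aMeas_fold_le adj d rest _
        _ < aMeas adj st.1 := by
            rw [h1]
            exact aMeas_add_lt adj st.1 nb (hns nb List.mem_cons_self) h

theorem mem_flatten_of_getD (adj : PySem.Dict String (List String)) (node : String) :
    ∀ nb ∈ adj.getD node [], nb ∈ adj.values.flatten := by
  intro nb hnb
  cases hg : adj.get? node with
  | none => rw [PySem.Dict.getD_of_get?_eq_none _ _ hg] at hnb; cases hnb
  | some l =>
    rw [PySem.Dict.getD_of_get?_eq_some _ _ hg] at hnb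
    have hitems := PySem.Dict.mem_items_of_get?_eq_some _ hg
    rw [List.mem_flatten]
    refine ⟨l, ?_, hnb⟩
    simp only [PySem.Dict.values]
    exact List.mem_map_of_mem hitems

def aLoop (adj : PySem.Dict String (List String)) (max_hops : Int)
    (queue : List (String × Int)) (visited : PySem.Set String)
    (layers : PySem.Dict Int (PySem.Set String)) :
    PySem.Set String × PySem.Dict Int (PySem.Set String) :=
  match queue with
  | [] => (visited, layers)
  | (node, depth) :: rest =>
    if depth ≥ max_hops then aLoop adj max_hops rest visited layers
    else
      let st := (adj.getD node []).foldl (aStep depth) (visited, rest, layers)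
      aLoop adj max_hops st.2.1 st.1 st.2.2
termination_by (aMeas adj visited, queue.length)
decreasing_by
  · exact Prod.Lex.right _ (by simp)
  · rcases aStep_fold_lex adj depth (adj.getD node []) (mem_flatten_of_getD adj node)
      (visited, rest, layers) with h | h
    · exact Prod.Lex.left _ _ h
    · rw [h]; exact Prod.Lex.right _ (by simp)

def bfs_subgraph (start_tables : List String) (adj : List (String × List String)) (max_hops : Int) : List String × (List (Int × List String)) :=
  let adjD : PySem.Dict String (List String) := PySem.Dict.mk adj
  let visited := PySem.Set.ofList start_tables
  let queue := start_tables.map (fun t => (t, (0 : Int)))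
  let layers : PySem.Dict Int (PySem.Set String) := PySem.Dict.mk [(0, PySem.Set.ofList start_tables)]
  let r := aLoop adjD max_hops queue visited layers
  (r.1, r.2.items)

-- ===== PORT B =====
-- inner 'for neighbor in adj.get(node, [])' body: state (visited, next_frontier)
def bInner (st : PySem.Set String × List String) (nb : String) : PySem.Set String × List String :=
  if PySem.Set.contains st.1 nb then st
  else (PySem.Set.add st.1 nb, st.2 ++ [nb])

-- 'for node in frontier' body
def bStep (adj : PySem.Dict String (List String)) (st : PySem.Set String × List String)
    (node : String) : PySem.Set String × List String :=
  (adj.getD node []).foldl bInner st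

def bLoop (adj : PySem.Dict String (List String)) (max_hops : Int) (hop : Int)
    (frontier : List String) (visited : PySem.Set String)
    (layers : PySem.Dict Int (PySem.Set String)) :
    PySem.Set String × PySem.Dict Int (PySem.Set String) :=
  if h : frontier ≠ [] ∧ hop ≤ max_hops then
    let st := frontier.foldl (bStep adj) (visited, ([] : List String))
    let layers := if st.2 ≠ [] then layers.insert hop (PySem.Set.ofList st.2) else layers
    bLoop adj max_hops (hop + 1) st.2 st.1 layers
  else (visited, layers)
termination_by (max_hops + 1 - hop).toNat
decreasing_by omega

def bfs_subgraph_alt (start_tables : List String) (adj : List (String × List String)) (max_hops : Int) : List String × (List (Int × List String)) :=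
  let adjD : PySem.Dict String (List String) := PySem.Dict.mk adj
  let visited := PySem.Set.ofList start_tables
  let frontier := start_tables
  let layers : PySem.Dict Int (PySem.Set String) := PySem.Dict.mk [(0, PySem.Set.ofList start_tables)]
  let r := bLoop adjD max_hops 1 frontier visited layers
  (r.1, r.2.items)

-- ===== PRECONDITION & SPEC =====
def Spec_bfs_subgraph (start_tables : List String) (adj : List (String × List String)) (max_hops : Int) (out : List String × (List (Int × List String))) : Prop := out = bfs_subgraph_alt start_tables adj max_hops
instance (start_tables : List String) (adj : List (String × List String)) (max_hops : Int) (out : List String × (List (Int × List String))) : Decidable (Spec_bfs_subgraph start_tables adj max_hops out) := by unfold Spec_bfs_subgraph; infer_instance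

-- ===== CLAIM (what is proved, stated in full; the proofs are below) =====
def Claim_equal_bfs_subgraph : Prop := ∀ (start_tables : List String) (adj : List (String × List String)) (max_hops : Int), Dom_bfs_subgraph start_tables adj max_hops → Spec_bfs_subgraph start_tables adj max_hops (bfs_subgraph start_tables adj max_hops)

-- ===== LEMMAS AND PROOFS =====

-- layers as seen during A's depth-d pass: base dict L plus the (d+1) layer collected so far
def layersOf (L : PySem.Dict Int (PySem.Set String)) (k : Int) (nf : List String) :
    PySem.Dict Int (PySem.Set String) :=
  if nf = [] then L else L.insert k (PySem.Set.ofList nf)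

theorem layersOf_step (L : PySem.Dict Int (PySem.Set String)) (k : Int) (nf : List String)
    (nb : String) (hL : L.contains k = false) :
    ((if (layersOf L k nf).contains k then layersOf L k nf
        else (layersOf L k nf).insert k PySem.Set.empty).modify k PySem.Set.empty
        (fun s => PySem.Set.add s nb)) = layersOf L k (nf ++ [nb]) := by
  by_cases hnf : nf = []
  · subst hnf
    have e0 : layersOf L k ([] : List String) = L := by simp [layersOf]
    have e1 : layersOf L k [nb] = L.insert k (PySem.Set.ofList [nb]) := by simp [layersOf]
    rw [e0, List.nil_append, e1, if_neg (by simp [hL]), PySem.Dict.modify,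
      PySem.Dict.getD_insert_self, PySem.Dict.insert_insert_self]
    rfl
  · have hnf2 : nf ++ [nb] ≠ [] := by simp
    have e0 : layersOf L k nf = L.insert k (PySem.Set.ofList nf) := by simp [layersOf, hnf]
    have e1 : layersOf L k (nf ++ [nb]) = L.insert k (PySem.Set.ofList (nf ++ [nb])) := by
      simp [layersOf, hnf2]
    rw [e0, e1, if_pos (PySem.Dict.contains_insert_self L k (PySem.Set.ofList nf)),
      PySem.Dict.modify, PySem.Dict.getD_insert_self, PySem.Dict.insert_insert_self,
      PySem.Set.ofList_append_singleton]

theorem inner_eq (d : Int) (ns : List String) :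
    ∀ (v : PySem.Set String) (nf : List String) (restQ : List (String × Int))
      (L : PySem.Dict Int (PySem.Set String)), L.contains (d + 1) = false →
    ns.foldl (aStep d) (v, restQ ++ nf.map (fun t => (t, d + 1)), layersOf L (d + 1) nf)
      = ((ns.foldl bInner (v, nf)).1,
         restQ ++ (ns.foldl bInner (v, nf)).2.map (fun t => (t, d + 1)),
         layersOf L (d + 1) (ns.foldl bInner (v, nf)).2) := by
  induction ns with
  | nil => intro v nf restQ L hL; rfl
  | cons nb ns ih =>
    intro v nf restQ L hL
    rw [List.foldl_cons, List.foldl_cons]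
    by_cases h : nb ∈ v
    · have ha : aStep d (v, restQ ++ nf.map (fun t => (t, d + 1)), layersOf L (d + 1) nf) nb
          = (v, restQ ++ nf.map (fun t => (t, d + 1)), layersOf L (d + 1) nf) := by
        simp [aStep, h]
      have hb : bInner (v, nf) nb = (v, nf) := by simp [bInner, h]
      rw [ha, hb]
      exact ih v nf restQ L hL
    · have ha0 : aStep d (v, restQ ++ nf.map (fun t => (t, d + 1)), layersOf L (d + 1) nf) nb
          = (PySem.Set.add v nb, (restQ ++ nf.map (fun t => (t, d + 1))) ++ [(nb, d + 1)],
             (if (layersOf L (d + 1) nf).contains (d + 1) then layersOf L (d + 1) nf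
                else (layersOf L (d + 1) nf).insert (d + 1) PySem.Set.empty).modify (d + 1)
                PySem.Set.empty (fun s => PySem.Set.add s nb)) := by
        simp [aStep, h]
      have ha : aStep d (v, restQ ++ nf.map (fun t => (t, d + 1)), layersOf L (d + 1) nf) nb
          = (PySem.Set.add v nb, restQ ++ (nf ++ [nb]).map (fun t => (t, d + 1)),
             layersOf L (d + 1) (nf ++ [nb])) := by
        rw [ha0, layersOf_step L (d + 1) nf nb hL]
        simp [List.map_append]
      have hb : bInner (v, nf) nb = (PySem.Set.add v nb, nf ++ [nb]) := by
        simp [bInner, h]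
      rw [ha, hb]
      exact ih (PySem.Set.add v nb) (nf ++ [nb]) restQ L hL

theorem skip_phase (adj : PySem.Dict String (List String)) (max_hops d : Int)
    (hd : max_hops ≤ d) :
    ∀ (fr : List String) (v : PySem.Set String) (L : PySem.Dict Int (PySem.Set String)),
    aLoop adj max_hops (fr.map (fun t => (t, d))) v L = (v, L) := by
  intro fr
  induction fr with
  | nil => intro v L; simp [aLoop]
  | cons t fr ih =>
    intro v L
    simp only [List.map_cons, aLoop]
    rw [if_pos hd]
    exact ih v L

theorem phase (adj : PySem.Dict String (List String)) (max_hops d : Int) (hd : d < max_hops) :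
    ∀ (fr : List String) (v : PySem.Set String) (nf : List String)
      (L : PySem.Dict Int (PySem.Set String)), L.contains (d + 1) = false →
    aLoop adj max_hops (fr.map (fun t => (t, d)) ++ nf.map (fun t => (t, d + 1))) v
        (layersOf L (d + 1) nf)
      = aLoop adj max_hops
          ((fr.foldl (bStep adj) (v, nf)).2.map (fun t => (t, d + 1)))
          (fr.foldl (bStep adj) (v, nf)).1
          (layersOf L (d + 1) (fr.foldl (bStep adj) (v, nf)).2) := by
  intro fr
  induction fr with
  | nil => intro v nf L hL; simp
  | cons node fr ih =>
    intro v nf L hL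
    simp only [List.map_cons, List.cons_append, aLoop]
    rw [if_neg (by omega : ¬ d ≥ max_hops)]
    have h1 := inner_eq d (adj.getD node []) v nf (fr.map (fun t => (t, d))) L hL
    simp only [h1]
    have h2 : (adj.getD node []).foldl bInner (v, nf) = bStep adj (v, nf) node := rfl
    rw [h2, List.foldl_cons]
    exact ih (bStep adj (v, nf) node).1 (bStep adj (v, nf) node).2 L hL

theorem bLoop_unfold_pos (adj : PySem.Dict String (List String)) (max_hops hop : Int)
    (fr : List String) (v : PySem.Set String) (L : PySem.Dict Int (PySem.Set String))
    (h : fr ≠ [] ∧ hop ≤ max_hops) :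
    bLoop adj max_hops hop fr v L =
      bLoop adj max_hops (hop + 1) (fr.foldl (bStep adj) (v, [])).2
        (fr.foldl (bStep adj) (v, [])).1
        (if (fr.foldl (bStep adj) (v, [])).2 ≠ [] then
            L.insert hop (PySem.Set.ofList (fr.foldl (bStep adj) (v, [])).2)
          else L) := by
  conv_lhs => rw [bLoop]
  rw [dif_pos h]

theorem main_eq (adj : PySem.Dict String (List String)) (max_hops : Int) :
    ∀ (n : Nat) (d : Int) (fr : List String) (v : PySem.Set String)
      (L : PySem.Dict Int (PySem.Set String)),
    (∀ k : Int, d + 1 ≤ k → L.contains k = false) → (max_hops - d).toNat ≤ n →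
    aLoop adj max_hops (fr.map (fun t => (t, d))) v L = bLoop adj max_hops (d + 1) fr v L := by
  intro n
  induction n with
  | zero =>
    intro d fr v L hk hmeas
    have hd : max_hops ≤ d := by omega
    rw [skip_phase adj max_hops d hd, bLoop]
    rw [dif_neg (by rintro ⟨-, h2⟩; omega)]
  | succ n ih =>
    intro d fr v L hk hmeas
    by_cases hfr : fr = []
    · subst hfr
      rw [bLoop, dif_neg (by rintro ⟨h1, -⟩; exact h1 rfl)]
      rw [List.map_nil]
      simp [aLoop]
    · by_cases hd : max_hops ≤ d
      · rw [skip_phase adj max_hops d hd, bLoop]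
        rw [dif_neg (by rintro ⟨-, h2⟩; omega)]
      · have hd' : d < max_hops := lt_of_not_ge hd
        have h1 := phase adj max_hops d hd' fr v [] L (hk (d + 1) le_rfl)
        rw [show layersOf L (d + 1) ([] : List String) = L from by simp [layersOf],
          List.map_nil, List.append_nil] at h1
        rw [h1]
        have hlay : (if (fr.foldl (bStep adj) (v, ([] : List String))).2 ≠ [] then
              L.insert (d + 1) (PySem.Set.ofList (fr.foldl (bStep adj) (v, [])).2) else L)
            = layersOf L (d + 1) (fr.foldl (bStep adj) (v, [])).2 := by
          unfold layersOf
          by_cases hnil : (fr.foldl (bStep adj) (v, ([] : List String))).2 = [] <;> simp [hnil]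
        have hk' : ∀ k : Int, (d + 1) + 1 ≤ k →
            (layersOf L (d + 1) (fr.foldl (bStep adj) (v, [])).2).contains k = false := by
          intro k hkk
          unfold layersOf
          by_cases hnil : (fr.foldl (bStep adj) (v, ([] : List String))).2 = []
          · rw [if_pos hnil]; exact hk k (by omega)
          · rw [if_neg hnil, PySem.Dict.contains_insert]
            have : (k == d + 1) = false := by
              rw [beq_eq_false_iff_ne]; omega
            rw [this, Bool.false_or]
            exact hk k (by omega)
        have hmeas' : (max_hops - (d + 1)).toNat ≤ n := by omega
        have h2 := ih (d + 1) (fr.foldl (bStep adj) (v, [])).2 (fr.foldl (bStep adj) (v, [])).1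
          (layersOf L (d + 1) (fr.foldl (bStep adj) (v, [])).2) hk' hmeas'
        rw [bLoop_unfold_pos adj max_hops (d + 1) fr v L ⟨hfr, by omega⟩, hlay]
        exact h2

-- ===== VERDICT (by name: the statement is the Claim_ definition above) =====
theorem bfs_subgraph_spec : Claim_equal_bfs_subgraph := by
  intro start_tables adj max_hops _
  unfold Spec_bfs_subgraph
  simp only [bfs_subgraph, bfs_subgraph_alt]
  rw [main_eq (PySem.Dict.mk adj) max_hops (max_hops - 0).toNat 0 start_tables
    (PySem.Set.ofList start_tables) (PySem.Dict.mk [(0, PySem.Set.ofList start_tables)])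
    (by intro k hk; simp [PySem.Dict.contains_mk]; omega) le_rfl]
  norm_num
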